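-- pv_equiv track=rewrite | github.com/AwfulSolution/Dastgah_Recognition | Dastgah_Classifier_v1/src/dastgah/data.py | _splits_are_valid
-- ===== SOURCE A (Python) =====
-- from typing import List, Dict, Tuple
--
-- def _splits_are_valid(splits: Dict[str, List[int]], n_tracks: int) -> bool:
--     required = {"train", "val", "test"}
--     if set(splits.keys()) != required:
--         return False
--
--     all_indices: List[int] = []
--     for key in ["train", "val", "test"]:
--         idxs = splits[key]
--         if not isinstance(idxs, list):
--             return False
--         if any((not isinstance(i, int)) or i < 0 or i >= n_tracks for i in idxs):
--             return False
--         all_indices.extend(idxs)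
--
--     unique = set(all_indices)
--     if len(unique) != n_tracks:
--         return False
--     return len(all_indices) == n_tracks
-- ===== SOURCE B (Python) =====
-- def _splits_are_valid(splits, n_tracks):
--     if set(splits.keys()) != {"train", "val", "test"}:
--         return False
--
--     seen = [False] * n_tracks
--     count = 0
--     for key in ["train", "val", "test"]:
--         idxs = splits[key]
--         if not isinstance(idxs, list):
--             return False
--         for i in idxs:
--             if (not isinstance(i, int)) or i < 0 or i >= n_tracks:
--                 return False
--             if seen[i]:
--                 return False
--             seen[i] = True
--             count += 1
--     return count == n_tracks
-- ===== Notes on version B (the rewrite author's own statement) =====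
-- stated objective: alternative
-- what changed: Replaces A's accumulate-all-indices-then-compare-set-size finale with a boolean seen bucket array: each validated index marks its slot, a duplicate is detected immediately on a marked slot, and coverage is the final count == n_tracks check.
import Mathlib
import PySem

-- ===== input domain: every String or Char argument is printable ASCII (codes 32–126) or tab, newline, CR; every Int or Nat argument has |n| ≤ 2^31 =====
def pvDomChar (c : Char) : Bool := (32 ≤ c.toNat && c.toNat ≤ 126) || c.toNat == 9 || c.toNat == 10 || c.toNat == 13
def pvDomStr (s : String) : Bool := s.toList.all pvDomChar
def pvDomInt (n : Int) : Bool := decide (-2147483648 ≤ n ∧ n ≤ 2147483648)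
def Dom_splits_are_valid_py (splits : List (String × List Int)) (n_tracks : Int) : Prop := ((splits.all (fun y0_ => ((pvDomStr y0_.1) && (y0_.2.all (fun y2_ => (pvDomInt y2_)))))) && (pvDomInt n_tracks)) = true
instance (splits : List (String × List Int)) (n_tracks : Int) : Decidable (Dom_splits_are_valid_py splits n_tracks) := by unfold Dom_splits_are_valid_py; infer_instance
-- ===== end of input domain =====

-- B replaces A's accumulate-then-set-compare finale with a boolean seen bucket array and a
-- running count (duplicates detected on the spot, coverage = count == n_tracks); same outputs.

-- ===== PORT A =====
-- shared helper: splits[key] (dict lookup; only used after the key-set check guarantees presence)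
def pvLookup (splits : List (String × List Int)) (k : String) : List Int :=
  PySem.Dict.getD (PySem.Dict.mk splits) k []

-- shared helper: set(splits.keys()) == {"train", "val", "test"}
def pvKeysOk (splits : List (String × List Int)) : Bool :=
  PySem.Set.equal (PySem.Set.ofList (PySem.Dict.keys (PySem.Dict.mk splits)))
    (PySem.Set.ofList ["train", "val", "test"])

-- A's for-loop: per split validate every index (the isinstance checks are vacuous under the
-- declared types) and extend all_indices; none = an early 'return False'
def pvLoopA (splits : List (String × List Int)) (n : Int) :
    List String → List Int → Option (List Int)
  | [], acc => some acc
  | k :: ks, acc =>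
    let idxs := pvLookup splits k
    if idxs.any (fun i => decide (i < 0) || decide (n ≤ i)) then none
    else pvLoopA splits n ks (acc ++ idxs)

def splits_are_valid_py (splits : List (String × List Int)) (n_tracks : Int) : Bool :=
  if !pvKeysOk splits then false
  else
    match pvLoopA splits n_tracks ["train", "val", "test"] [] with
    | none => false
    | some all_indices =>
      let unique : PySem.Set Int := PySem.Set.ofList all_indices
      if !(decide ((unique.length : Int) = n_tracks)) then false
      else decide ((all_indices.length : Int) = n_tracks)

-- ===== PORT B =====
-- B's inner loop body: validate i, fail on a marked slot, else mark it and bump count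
def pvStepB (n : Int) (st : Option (List Bool × Int)) (i : Int) : Option (List Bool × Int) :=
  match st with
  | none => none
  | some (seen, cnt) =>
    if decide (i < 0) || decide (n ≤ i) then none
    else if PySem.List.pyGetD seen i false then none
    else some (PySem.List.pySetD seen i true, cnt + 1)

def pvLoopB (splits : List (String × List Int)) (n : Int) :
    List String → Option (List Bool × Int) → Option (List Bool × Int)
  | [], st => st
  | k :: ks, st => pvLoopB splits n ks ((pvLookup splits k).foldl (pvStepB n) st)

def splits_are_valid_py_alt (splits : List (String × List Int)) (n_tracks : Int) : Bool :=
  if !pvKeysOk splits then false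
  else
    match pvLoopB splits n_tracks ["train", "val", "test"]
        (some (List.replicate n_tracks.toNat false, 0)) with
    | none => false
    | some (_, cnt) => decide (cnt = n_tracks)

-- ===== PRECONDITION & SPEC =====
def Spec_splits_are_valid_py (splits : List (String × List Int)) (n_tracks : Int) (out : Bool) : Prop := out = splits_are_valid_py_alt splits n_tracks
instance (splits : List (String × List Int)) (n_tracks : Int) (out : Bool) : Decidable (Spec_splits_are_valid_py splits n_tracks out) := by unfold Spec_splits_are_valid_py; infer_instance

-- ===== CLAIM (what is proved, stated in full; the proofs are below) =====
def Claim_equal_splits_are_valid_py : Prop := ∀ (splits : List (String × List Int)) (n_tracks : Int), Dom_splits_are_valid_py splits n_tracks → Spec_splits_are_valid_py splits n_tracks (splits_are_valid_py splits n_tracks)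

-- ===== LEMMAS AND PROOFS =====

theorem pv_foldB_none (n : Int) (l : List Int) :
    l.foldl (pvStepB n) none = none := by
  induction l with
  | nil => rfl
  | cons a l ih => simpa [pvStepB] using ih

theorem pv_pyGetD_toNat (seen : List Bool) (a : Int) (h0 : 0 ≤ a) :
    PySem.List.pyGetD seen a false = seen.getD a.toNat false := by
  obtain ⟨m, rfl⟩ : ∃ m : Nat, a = (m : Int) := ⟨a.toNat, by omega⟩
  rw [PySem.List.pyGetD_natCast]
  simp

theorem pv_pySetD_toNat (seen : List Bool) (a : Int) (h0 : 0 ≤ a) :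
    PySem.List.pySetD seen a true = seen.set a.toNat true := by
  obtain ⟨m, rfl⟩ : ∃ m : Nat, a = (m : Int) := ⟨a.toNat, by omega⟩
  rw [PySem.List.pySetD_natCast]
  simp

theorem pv_getD_set_true (seen : List Bool) (p q : Nat) (hp : p < seen.length) :
    (seen.set p true).getD q false = if q = p then true else seen.getD q false := by
  simp only [List.getD_eq_getElem?_getD, List.getElem?_set]
  rcases eq_or_ne q p with h | h
  · simp [h, hp]
  · simp [h, Ne.symm h]

theorem pv_getD_replicate (m q : Nat) :
    (List.replicate m false).getD q false = false := by
  simp only [List.getD_eq_getElem?_getD, List.getElem?_replicate]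
  split <;> simp

-- characterization of B's inner fold over one flat list of indices
theorem pv_foldB_char (n : Int) (l : List Int) (seen : List Bool) (cnt : Int)
    (hlen : seen.length = n.toNat) :
    l.foldl (pvStepB n) (some (seen, cnt)) =
      if (∀ i ∈ l, 0 ≤ i ∧ i < n ∧ seen.getD i.toNat false = false) ∧ l.Nodup
      then some (l.foldl (fun s i => s.set i.toNat true) seen, cnt + l.length)
      else none := by
  induction l generalizing seen cnt with
  | nil => simp
  | cons a l ih =>
    by_cases ha : 0 ≤ a ∧ a < n
    · have hran : a.toNat < seen.length := by omega
      by_cases hseen : seen.getD a.toNat false = true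
      · have hstep : pvStepB n (some (seen, cnt)) a = none := by
          simp only [pvStepB, pv_pyGetD_toNat seen a ha.1, hseen]
          simp [not_lt.mpr ha.1, not_le.mpr ha.2]
        rw [List.foldl_cons, hstep, pv_foldB_none]
        have hc : ¬ ((∀ i ∈ a :: l, 0 ≤ i ∧ i < n ∧ seen.getD i.toNat false = false) ∧ (a :: l).Nodup) := by
          rintro ⟨h, -⟩
          have := (h a (List.mem_cons_self ..)).2.2
          rw [hseen] at this
          exact Bool.true_eq_false.mp this
        exact (if_neg hc).symm
      · have hseen' : seen.getD a.toNat false = false := by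
          cases h : seen.getD a.toNat false
          · rfl
          · exact absurd h hseen
        have hstep : pvStepB n (some (seen, cnt)) a
            = some (seen.set a.toNat true, cnt + 1) := by
          simp only [pvStepB, pv_pyGetD_toNat seen a ha.1, pv_pySetD_toNat seen a ha.1, hseen']
          simp [not_lt.mpr ha.1, not_le.mpr ha.2]
        rw [List.foldl_cons, hstep, ih _ _ (by simp [hlen])]
        have hiff : ((∀ i ∈ l, 0 ≤ i ∧ i < n ∧ (seen.set a.toNat true).getD i.toNat false = false) ∧ l.Nodup)
            ↔ ((∀ i ∈ a :: l, 0 ≤ i ∧ i < n ∧ seen.getD i.toNat false = false) ∧ (a :: l).Nodup) := by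
          constructor
          · rintro ⟨h, hnd⟩
            have hnotmem : a ∉ l := by
              intro hm
              have h3 := (h a hm).2.2
              rw [pv_getD_set_true seen a.toNat a.toNat hran] at h3
              simp at h3
            refine ⟨?_, List.nodup_cons.mpr ⟨hnotmem, hnd⟩⟩
            intro i hi
            rcases List.mem_cons.mp hi with rfl | hi
            · exact ⟨ha.1, ha.2, hseen'⟩
            · obtain ⟨h1, h2, h3⟩ := h i hi
              rw [pv_getD_set_true seen a.toNat i.toNat hran] at h3
              by_cases he : i.toNat = a.toNat
              · simp [he] at h3
              · rw [if_neg he] at h3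
                exact ⟨h1, h2, h3⟩
          · rintro ⟨h, hnd⟩
            have hnd' := List.nodup_cons.mp hnd
            refine ⟨fun i hi => ?_, hnd'.2⟩
            obtain ⟨h1, h2, h3⟩ := h i (List.mem_cons_of_mem _ hi)
            have hne : i.toNat ≠ a.toNat := by
              intro he
              have : i = a := by omega
              exact hnd'.1 (this ▸ hi)
            rw [pv_getD_set_true seen a.toNat i.toNat hran, if_neg hne]
            exact ⟨h1, h2, h3⟩
        by_cases hc : (∀ i ∈ a :: l, 0 ≤ i ∧ i < n ∧ seen.getD i.toNat false = false) ∧ (a :: l).Nodup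
        · rw [if_pos (hiff.mpr hc), if_pos hc]
          simp only [List.foldl_cons, List.length_cons]
          refine congrArg _ (Prod.ext rfl ?_)
          push_cast
          ring
        · rw [if_neg (fun h => hc (hiff.mp h)), if_neg hc]
    · have hstep : pvStepB n (some (seen, cnt)) a = none := by
        simp only [pvStepB]
        have h : a < 0 ∨ n ≤ a := by omega
        rcases h with h | h <;> simp [h]
      rw [List.foldl_cons, hstep, pv_foldB_none]
      have hc : ¬ ((∀ i ∈ a :: l, 0 ≤ i ∧ i < n ∧ seen.getD i.toNat false = false) ∧ (a :: l).Nodup) := by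
        rintro ⟨h, -⟩
        have := h a (List.mem_cons_self ..)
        omega
      exact (if_neg hc).symm

theorem pv_nodup_of_ofList_length (l : List Int)
    (h : (PySem.Set.ofList l).length = l.length) : l.Nodup := by
  have hnd : (PySem.Set.ofList l).Nodup := PySem.Set.nodup_ofList l
  have hfs : (PySem.Set.ofList l).toFinset = l.toFinset := by
    ext x
    simp [List.mem_toFinset, PySem.Set.mem_ofList]
  have h1 : (PySem.Set.ofList l).toFinset.card = (PySem.Set.ofList l).length :=
    List.toFinset_card_of_nodup hnd
  have h2 : l.toFinset.card = l.dedup.length := List.card_toFinset l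
  have h3 : l.dedup.length = l.length := by rw [← h2, ← hfs, h1, h]
  exact List.dedup_eq_self.mp (List.Sublist.eq_of_length (List.dedup_sublist l) h3)

-- ===== VERDICT (by name: the statement is the Claim_ definition above) =====
theorem splits_are_valid_py_spec : Claim_equal_splits_are_valid_py := by
  intro splits n _
  unfold Spec_splits_are_valid_py splits_are_valid_py splits_are_valid_py_alt
  cases hk : pvKeysOk splits with
  | false => simp
  | true =>
    simp only [Bool.not_true, Bool.false_eq_true, if_false]
    have hB : pvLoopB splits n ["train", "val", "test"] (some (List.replicate n.toNat false, 0)) =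
        ((pvLookup splits "train" ++ pvLookup splits "val") ++ pvLookup splits "test").foldl
          (pvStepB n) (some (List.replicate n.toNat false, 0)) := by
      simp [pvLoopB, List.foldl_append]
    rw [hB, pv_foldB_char n _ _ _ (by simp)]
    set l1 := pvLookup splits "train" with hl1
    set l2 := pvLookup splits "val" with hl2
    set l3 := pvLookup splits "test" with hl3
    set all := (l1 ++ l2) ++ l3 with hall
    by_cases hin : ∀ i ∈ all, 0 ≤ i ∧ i < n
    · have hany : ∀ lk : List Int, (∀ i ∈ lk, i ∈ all) →
          lk.any (fun i => decide (i < 0) || decide (n ≤ i)) = false := by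
        intro lk hsub
        rw [List.any_eq_false]
        intro i hi
        have := hin i (hsub i hi)
        simp only [Bool.or_eq_true, decide_eq_true_eq]
        omega
      have h1 := hany l1 (fun i hi => by simp [hall, hi])
      have h2 := hany l2 (fun i hi => by simp [hall, hi])
      have h3 := hany l3 (fun i hi => by simp [hall, hi])
      have hA : pvLoopA splits n ["train", "val", "test"] [] = some all := by
        simp [pvLoopA, ← hl1, ← hl2, ← hl3, h1, h2, h3, hall]
      rw [hA]
      by_cases hnd : all.Nodup
      · have hcond : (∀ i ∈ all, 0 ≤ i ∧ i < n ∧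
            (List.replicate n.toNat false).getD i.toNat false = false) ∧ all.Nodup :=
          ⟨fun i hi => ⟨(hin i hi).1, (hin i hi).2, pv_getD_replicate _ _⟩, hnd⟩
        rw [if_pos hcond]
        by_cases hlen : (all.length : Int) = n <;>
          simp [PySem.Set.ofList_eq_self_of_nodup _ hnd, hlen]
      · rw [if_neg (fun h => hnd h.2)]
        by_cases hu : ((PySem.Set.ofList all).length : Int) = n
        · by_cases hl : (all.length : Int) = n
          · exact absurd (pv_nodup_of_ofList_length all (by omega)) hnd
          · simp [hu, hl]
        · simp [hu]
    · rw [if_neg (fun h => hin (fun i hi => ⟨(h.1 i hi).1, (h.1 i hi).2.1⟩))]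
      push Not at hin
      obtain ⟨i, hi, hbad⟩ := hin
      by_cases a1 : l1.any (fun i => decide (i < 0) || decide (n ≤ i))
      · simp [pvLoopA, ← hl1, a1]
      · by_cases a2 : l2.any (fun i => decide (i < 0) || decide (n ≤ i))
        · simp [pvLoopA, ← hl1, ← hl2, a1, a2]
        · by_cases a3 : l3.any (fun i => decide (i < 0) || decide (n ≤ i))
          · simp [pvLoopA, ← hl1, ← hl2, ← hl3, a1, a2, a3]
          · exfalso
            have hok : ∀ lk : List Int,
                lk.any (fun i => decide (i < 0) || decide (n ≤ i)) = false →
                ∀ j ∈ lk, 0 ≤ j ∧ j < n := by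
              intro lk hlk j hj
              rw [List.any_eq_false] at hlk
              have := hlk j hj
              simp only [Bool.or_eq_true, decide_eq_true_eq] at this
              omega
            rcases List.mem_append.mp hi with hi' | hi'
            · rcases List.mem_append.mp hi' with h | h
              · have hh := hok l1 (by simpa using a1) i h
                have := hbad hh.1
                omega
              · have hh := hok l2 (by simpa using a2) i h
                have := hbad hh.1
                omega
            · have hh := hok l3 (by simpa using a3) i hi'
              have := hbad hh.1
              omega
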